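-- pv_equiv track=rewrite | github.com/DecodeFF/Digital_information_processing | BASIC OPERATIONS WITH SIGNALS.py | expand_signal
-- ===== SOURCE A (Python) =====
-- def expand_signal(signal, expansion_factor):
--     expanded_signal = []
--     for i in range(len(signal)):
--         new_index = i * expansion_factor
--         expanded_signal.append(signal[i])
--         if i < len(signal) - 1:
--             for j in range(1, expansion_factor):
--                 expanded_signal.append(0)
--     return expanded_signal
-- ===== SOURCE B (Python) =====
-- def expand_signal(sig, expansion_factor):
--     if not sig or expansion_factor <= 1:
--         return list(sig)
--     out = [0] * ((len(sig) - 1) * expansion_factor + 1)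
--     for i, s in enumerate(sig):
--         out[i * expansion_factor] = s
--     return out
-- ===== Notes on version B (the rewrite author's own statement) =====
-- stated objective: faster
-- what changed: Replaces A's append-sample-then-inner-zero-loop construction with a preallocated zero buffer of computed length (len-1)*factor+1 into which samples are scattered at stride expansion_factor (degenerate empty/<=1 cases return a copy of the input).
import Mathlib
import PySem

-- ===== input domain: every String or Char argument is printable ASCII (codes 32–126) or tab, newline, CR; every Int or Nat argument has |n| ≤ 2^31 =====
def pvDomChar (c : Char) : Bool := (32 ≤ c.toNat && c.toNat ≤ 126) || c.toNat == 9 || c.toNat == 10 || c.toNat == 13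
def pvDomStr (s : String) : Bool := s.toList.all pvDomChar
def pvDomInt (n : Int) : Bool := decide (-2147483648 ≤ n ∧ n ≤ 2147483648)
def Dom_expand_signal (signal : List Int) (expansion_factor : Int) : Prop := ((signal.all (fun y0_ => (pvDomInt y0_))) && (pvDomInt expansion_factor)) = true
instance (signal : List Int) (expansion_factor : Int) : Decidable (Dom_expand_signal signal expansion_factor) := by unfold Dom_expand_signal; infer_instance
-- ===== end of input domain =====

-- B replaces A's append-sample-then-inner-zero-loop with a preallocated zero buffer of
-- computed length into which the samples are scattered at stride expansion_factor
-- (fewer Python-level operations; a constant-factor change, same asymptotics).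

-- ===== PORT A =====
def expand_signal (signal : List Int) (expansion_factor : Int) : List Int :=
  (PySem.List.pyRange 0 signal.length 1).foldl
    (fun expanded_signal i =>
      let _new_index := i * expansion_factor
      let expanded_signal := expanded_signal ++ [PySem.List.pyGetD signal i 0]
      if i < (signal.length : Int) - 1 then
        (PySem.List.pyRange 1 expansion_factor 1).foldl
          (fun acc _j => acc ++ [(0 : Int)]) expanded_signal
      else expanded_signal)
    []

-- ===== PORT B =====
def expand_signal_alt (signal : List Int) (expansion_factor : Int) : List Int :=
  if signal = [] ∨ expansion_factor ≤ 1 then signal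
  else
    (PySem.List.enumerate signal).foldl
      (fun out p => PySem.List.pySetD out (p.1 * expansion_factor) p.2)
      (List.replicate (((signal.length : Int) - 1) * expansion_factor + 1).toNat 0)

-- ===== PRECONDITION & SPEC =====
def Spec_expand_signal (signal : List Int) (expansion_factor : Int) (out : List Int) : Prop := out = expand_signal_alt signal expansion_factor
instance (signal : List Int) (expansion_factor : Int) (out : List Int) : Decidable (Spec_expand_signal signal expansion_factor out) := by unfold Spec_expand_signal; infer_instance

-- ===== CLAIM (what is proved, stated in full; the proofs are below) =====
def Claim_equal_expand_signal : Prop := ∀ (signal : List Int) (expansion_factor : Int), Dom_expand_signal signal expansion_factor → Spec_expand_signal signal expansion_factor (expand_signal signal expansion_factor)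

-- ===== LEMMAS AND PROOFS =====

-- canonical form: each sample followed by z zeros, except the last sample
def itl (z : Nat) : List Int → List Int
  | [] => []
  | [a] => [a]
  | a :: b :: rest => a :: (List.replicate z 0 ++ itl z (b :: rest))

theorem itl_zero (l : List Int) : itl 0 l = l := by
  induction l with
  | nil => rfl
  | cons a rest ih =>
    cases rest with
    | nil => rfl
    | cons b r => simp [itl] at ih ⊢; exact ih

-- A's inner zero-appending loop
theorem foldl_zeros (l : List Int) (acc : List Int) :
    l.foldl (fun a _ => a ++ [(0 : Int)]) acc = acc ++ List.replicate l.length 0 := by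
  induction l generalizing acc with
  | nil => simp
  | cons x t ih =>
    simp [List.foldl_cons, ih, List.append_assoc, ← List.replicate_succ]

theorem flatMap_ext (l : List Nat) (f g : Nat → List Int) (h : ∀ x, f x = g x) :
    l.flatMap f = l.flatMap g := by
  rw [funext h]

-- A's fold as a flatMap over List.range
theorem flat_range (z : Nat) (signal : List Int) :
    (List.range signal.length).flatMap
      (fun k => signal.getD k 0 ::
        if (k : Int) < (signal.length : Int) - 1 then List.replicate z 0 else [])
    = itl z signal := by
  induction signal with
  | nil => simp [itl]
  | cons a rest ih =>
    cases rest with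
    | nil => simp [itl]
    | cons b rest' =>
      rw [List.length_cons, List.range_succ_eq_map, List.flatMap_cons, List.flatMap_map]
      have h0 : (((0 : ℕ) : ℤ) < ((rest'.length + 1 + 1 : ℕ) : ℤ) - 1) := by push_cast; omega
      simp only [List.length_cons] at h0 ⊢
      simp only [List.getD_cons_zero, if_pos h0]
      rw [List.cons_append]
      rw [show itl z (a :: b :: rest') = a :: (List.replicate z 0 ++ itl z (b :: rest')) from rfl]
      congr 1
      congr 1
      rw [← ih]
      apply flatMap_ext
      intro k
      have hc : (((Nat.succ k : ℕ) : ℤ) < ((rest'.length + 1 + 1 : ℕ) : ℤ) - 1)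
          ↔ (((k : ℕ) : ℤ) < ((rest'.length + 1 : ℕ) : ℤ) - 1) := by push_cast; omega
      simp only [List.length_cons, List.getD_cons_succ]
      push_cast at hc ⊢
      simp only [hc]

theorem A_eq (signal : List Int) (ef : Int) :
    expand_signal signal ef = itl (ef - 1).toNat signal := by
  unfold expand_signal
  have hfun : (fun (expanded_signal : List Int) (i : Int) =>
      let _new_index := i * ef
      let expanded_signal := expanded_signal ++ [PySem.List.pyGetD signal i 0]
      if i < (signal.length : Int) - 1 then
        (PySem.List.pyRange 1 ef 1).foldl (fun acc _j => acc ++ [(0 : Int)]) expanded_signal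
      else expanded_signal)
      = (fun (acc : List Int) (i : Int) => acc ++
          (PySem.List.pyGetD signal i 0 ::
            if i < (signal.length : Int) - 1 then List.replicate (ef - 1).toNat 0 else [])) := by
    funext acc i
    simp only [foldl_zeros, PySem.List.length_pyRange_one]
    split <;> simp
  rw [hfun, PySem.List.foldl_append_eq_flatMap, List.nil_append]
  rw [PySem.List.pyRange_one, List.flatMap_map]
  have : (fun k : Nat => ((fun i : Int => PySem.List.pyGetD signal i 0 ::
        if i < (signal.length : Int) - 1 then List.replicate (ef - 1).toNat 0 else [])
        ((0 : Int) + k)))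
      = (fun k : Nat => signal.getD k 0 ::
        if (k : Int) < (signal.length : Int) - 1 then List.replicate (ef - 1).toNat 0 else []) := by
    funext k
    simp [PySem.List.pyGetD_natCast]
  rw [show (((signal.length : Int) - 0).toNat) = signal.length by omega]
  rw [this, flat_range]

-- setting an index past a prefix
theorem set_append (l1 l2 : List Int) (k : Nat) (x : Int) :
    (l1 ++ l2).set (l1.length + k) x = l1 ++ l2.set k x := by
  induction l1 with
  | nil => simp
  | cons a t ih => simp [List.length_cons, Nat.succ_add, ih]

-- B's scatter loop with an arbitrary already-written prefix
theorem scatter_gen (e : Nat) (he : 1 ≤ e) (signal : List Int) :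
    ∀ (pre : List Int) (s : Nat), signal ≠ [] → pre.length = s * e →
    (PySem.List.enumerate signal (s : Int)).foldl
        (fun out p => PySem.List.pySetD out (p.1 * (e : Int)) p.2)
        (pre ++ List.replicate ((signal.length - 1) * e + 1) 0)
      = pre ++ itl (e - 1) signal := by
  induction signal with
  | nil => intro _ _ h _; exact absurd rfl h
  | cons a rest ih =>
    intro pre s _ hpre
    cases rest with
    | nil =>
      rw [PySem.List.enumerate_cons, PySem.List.enumerate_nil]
      simp only [List.length_cons, List.length_nil, List.foldl_cons, List.foldl_nil]
      have hcast : (s : Int) * (e : Int) = ((s * e : Nat) : Int) := by push_cast; ring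
      rw [hcast, PySem.List.pySetD_natCast]
      rw [show s * e = pre.length + 0 by omega]
      rw [set_append]
      simp [itl]
    | cons b rest' =>
      rw [PySem.List.enumerate_cons, List.foldl_cons]
      have hlen : ((a :: b :: rest').length - 1) * e + 1 = e + ((b :: rest').length - 1) * e + 1 := by
        simp only [List.length_cons]
        have : rest'.length + 1 + 1 - 1 = (rest'.length + 1 - 1) + 1 := by omega
        rw [this, Nat.succ_mul]; ring
      rw [hlen]
      have hsplit : List.replicate (e + ((b :: rest').length - 1) * e + 1) (0 : Int)
          = List.replicate e 0 ++ List.replicate (((b :: rest').length - 1) * e + 1) 0 := by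
        rw [← List.replicate_add]; ring_nf
      rw [hsplit]
      have hcast : (s : Int) * (e : Int) = ((s * e : Nat) : Int) := by push_cast; ring
      rw [hcast, PySem.List.pySetD_natCast]
      have hassoc : pre ++ (List.replicate e (0 : Int) ++ List.replicate (((b :: rest').length - 1) * e + 1) 0)
          = (pre ++ List.replicate e 0) ++ List.replicate (((b :: rest').length - 1) * e + 1) 0 := by
        simp
      rw [hassoc]
      rw [show s * e = pre.length + 0 by omega]
      have hset : ((pre ++ List.replicate e (0 : Int)) ++ List.replicate (((b :: rest').length - 1) * e + 1) 0).set (pre.length + 0) a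
          = (pre ++ (a :: List.replicate (e - 1) 0)) ++ List.replicate (((b :: rest').length - 1) * e + 1) 0 := by
        rw [List.append_assoc, set_append]
        have : (List.replicate e (0 : Int) ++ List.replicate (((b :: rest').length - 1) * e + 1) 0).set 0 a
            = (a :: List.replicate (e - 1) 0) ++ List.replicate (((b :: rest').length - 1) * e + 1) 0 := by
          rw [show e = (e - 1) + 1 by omega, List.replicate_succ, List.cons_append, List.set_cons_zero]
          simp [show (e - 1) + 1 - 1 = e - 1 by omega]
        rw [this]; simp
      rw [hset]
      have hstart : (s : Int) + 1 = ((s + 1 : Nat) : Int) := by push_cast; ring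
      rw [hstart]
      rw [ih (pre ++ (a :: List.replicate (e - 1) 0)) (s + 1) (by simp) (by
        simp only [List.length_append, List.length_cons, List.length_replicate]
        rw [hpre, Nat.succ_mul]
        omega)]
      simp [itl]

-- ===== VERDICT (by name: the statement is the Claim_ definition above) =====
theorem expand_signal_spec : Claim_equal_expand_signal := by
  intro signal ef _
  unfold Spec_expand_signal
  rw [A_eq]
  unfold expand_signal_alt
  by_cases hcase : signal = [] ∨ ef ≤ 1
  · rw [if_pos hcase]
    rcases hcase with h | h
    · subst h; rfl
    · rw [show (ef - 1).toNat = 0 by omega, itl_zero]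
  · rw [if_neg hcase]
    push Not at hcase
    obtain ⟨hne, hef⟩ := hcase
    have h1 : 1 ≤ signal.length := List.length_pos_iff.mpr hne
    have he2 : 2 ≤ ef.toNat := by omega
    have heq : ef = ((ef.toNat : Nat) : Int) := by omega
    have hz : (ef - 1).toNat = ef.toNat - 1 := by omega
    have hrep : (((signal.length : Int) - 1) * ef + 1).toNat
        = (signal.length - 1) * ef.toNat + 1 := by
      have : ((signal.length : Int) - 1) * ef + 1 = (((signal.length - 1) * ef.toNat + 1 : Nat) : Int) := by
        push_cast [Nat.cast_sub h1]
        rw [← heq]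
      rw [this, Int.toNat_natCast]
    rw [hz, hrep]
    have := scatter_gen ef.toNat (by omega) signal [] 0 hne (by simp)
    simp only [List.nil_append, Nat.cast_zero] at this
    rw [heq]
    exact this.symm
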